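-- pv_equiv track=rewrite | github.com/mesflores/capacity | gtfs_reader.py | split_route
-- ===== SOURCE A (Python) =====
-- def split_route(route):
--     """ Checks to see if a route contains an out and back.
--         If so, split it into 2 separate routes
--     """
--     split_index = None
--     # Loop over each step
--     for index, hop in enumerate(route):
--         if index == 0:
--             continue
--         curr_stop = hop[0]
--         prev_stop = route[index - 1][0]
--
--         if prev_stop == curr_stop:
--             split_index = index
--
--     # If we never found a double just return the original route in a list
--     if split_index is None:
--         return [route,]
--
--     # Split it on the double, return the halves
--     return [route[:split_index], route[split_index:]]
-- ===== SOURCE B (Python) =====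
-- def split_route(route):
--     """ Checks to see if a route contains an out and back.
--         If so, split it into 2 separate routes
--     """
--     # Run-length encode consecutive equal stop ids as (start, length) runs.
--     runs = []
--     for i, hop in enumerate(route):
--         if runs and route[runs[-1][0]][0] == hop[0]:
--             runs[-1] = (runs[-1][0], runs[-1][1] + 1)
--         else:
--             runs.append((i, 1))
--
--     # The last run of length >= 2 ends at the split point.
--     for start, length in reversed(runs):
--         if length >= 2:
--             k = start + length - 1
--             return [route[:k], route[k:]]
--
--     # No run repeats a stop: return the original route in a list
--     return [route]
-- ===== Notes on version B (the rewrite author's own statement) =====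
-- stated objective: alternative
-- what changed: B run-length encodes the route's consecutive equal stop ids into (start, length) runs in one pass, then scans the RUNS (not the stops) from the end: the last run of length >= 2 ends at the split index; A instead compares every adjacent stop pair and keeps overwriting the last matching index.
import Mathlib
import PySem

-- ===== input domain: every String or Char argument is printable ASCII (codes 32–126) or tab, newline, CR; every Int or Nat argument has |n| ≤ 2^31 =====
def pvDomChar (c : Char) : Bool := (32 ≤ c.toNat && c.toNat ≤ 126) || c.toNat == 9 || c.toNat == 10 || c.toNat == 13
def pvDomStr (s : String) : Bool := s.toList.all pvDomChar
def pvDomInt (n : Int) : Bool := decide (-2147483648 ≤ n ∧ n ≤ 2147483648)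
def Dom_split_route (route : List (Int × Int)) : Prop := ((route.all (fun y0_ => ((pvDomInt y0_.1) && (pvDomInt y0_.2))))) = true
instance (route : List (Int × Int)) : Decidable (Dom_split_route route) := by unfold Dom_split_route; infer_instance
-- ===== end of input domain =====

-- B replaces A's per-stop adjacent comparison with a run-length encoding of
-- consecutive equal stop ids, then scans the runs from the end for the last
-- run of length ≥ 2 (same return value, different algorithm; same cost).

-- ===== PORT A =====
-- forward scan over enumerate(route); route[index-1] indexed with a Python int, so pyGetD is exact
def split_route (route : List (Int × Int)) : List (List (Int × Int)) :=
  let split_index : Option Int :=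
    (PySem.List.enumerate route 0).foldl
      (fun split_index p =>
        if p.1 = 0 then split_index
        else
          let curr_stop := p.2.1
          let prev_stop := (PySem.List.pyGetD route (p.1 - 1) (0, 0)).1
          if prev_stop = curr_stop then some p.1 else split_index)
      none
  match split_index with
  | none => [route]
  | some k => [PySem.List.slice route none (some k), PySem.List.slice route (some k) none]

-- ===== PORT B =====
-- one step of Source B's run-building loop body: extend the last run if the new hop's
-- stop id equals the run's first stop id (route[runs[-1][0]][0]), else open a run (i, 1)
def split_route_alt_step (route : List (Int × Int)) (runs : List (Int × Int))
    (i : Int) (hop : Int × Int) : List (Int × Int) :=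
  match runs.getLast? with
  | some sl =>
      if (PySem.List.pyGetD route sl.1 (0, 0)).1 = hop.1
      then runs.dropLast ++ [(sl.1, sl.2 + 1)]
      else runs ++ [(i, 1)]
  | none => runs ++ [(i, 1)]

def split_route_alt (route : List (Int × Int)) : List (List (Int × Int)) :=
  let runs := (PySem.List.enumerate route 0).foldl
    (fun rs p => split_route_alt_step route rs p.1 p.2) []
  -- 'for start, length in reversed(runs): if length >= 2: return …'
  match runs.reverse.find? (fun sl => 2 ≤ sl.2) with
  | none => [route]
  | some sl =>
      let k := sl.1 + sl.2 - 1
      [PySem.List.slice route none (some k), PySem.List.slice route (some k) none]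

-- ===== PRECONDITION & SPEC =====
def Spec_split_route (route : List (Int × Int)) (out : List (List (Int × Int))) : Prop := out = split_route_alt route
instance (route : List (Int × Int)) (out : List (List (Int × Int))) : Decidable (Spec_split_route route out) := by unfold Spec_split_route; infer_instance

-- ===== CLAIM (what is proved, stated in full; the proofs are below) =====
def Claim_equal_split_route : Prop := ∀ (route : List (Int × Int)), Dom_split_route route → Spec_split_route route (split_route route)

-- ===== LEMMAS AND PROOFS =====

-- A's fold over the first n indices
def pvF (route : List (Int × Int)) (n : Nat) : Option Int :=
  (List.range n).foldl
    (fun acc (k : Nat) =>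
      if (k : Int) = 0 then acc
      else if (PySem.List.pyGetD route ((k : Int) - 1) (0, 0)).1 = (route.getD k (0, 0)).1
        then some (k : Int) else acc)
    none

-- B's runs after the first n indices
def pvR (route : List (Int × Int)) (n : Nat) : List (Int × Int) :=
  (List.range n).foldl
    (fun rs (k : Nat) => split_route_alt_step route rs (k : Int) (route.getD k (0, 0)))
    []

-- B's final answer read off a runs list
def pvAns (runs : List (Int × Int)) : Option Int :=
  (runs.reverse.find? (fun sl => 2 ≤ sl.2)).map (fun sl => sl.1 + sl.2 - 1)

-- enumerate as a map over range, so both folds become folds over Nat indices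
lemma enum_eq_map_range (xs : List (Int × Int)) (s : Int) :
    PySem.List.enumerate xs s
      = (List.range xs.length).map (fun (k : Nat) => (s + (k : Int), xs.getD k (0, 0))) := by
  induction xs generalizing s with
  | nil => simp [PySem.List.enumerate_nil]
  | cons x xs ih =>
      rw [PySem.List.enumerate_cons, ih (s + 1)]
      simp only [List.length_cons, List.range_succ_eq_map, List.map_cons, List.map_map]
      refine congrArg₂ List.cons (by simp) ?_
      apply List.map_congr_left
      intro k _
      simp only [Function.comp_apply, Nat.succ_eq_add_one, List.getD_cons_succ]
      congr 1
      push_cast; ring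

lemma pvF_succ (route : List (Int × Int)) (n : Nat) :
    pvF route (n + 1)
      = if (n : Int) = 0 then pvF route n
        else if (PySem.List.pyGetD route ((n : Int) - 1) (0, 0)).1 = (route.getD n (0, 0)).1
          then some (n : Int) else pvF route n := by
  unfold pvF
  rw [List.range_succ, List.foldl_append, List.foldl_cons, List.foldl_nil]

lemma pvR_succ (route : List (Int × Int)) (n : Nat) :
    pvR route (n + 1) = split_route_alt_step route (pvR route n) (n : Int) (route.getD n (0, 0)) := by
  unfold pvR
  rw [List.range_succ, List.foldl_append, List.foldl_cons, List.foldl_nil]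

-- invariant carried through the fold: B's runs answer tracks A's fold, and the
-- last run (s, l) ends at index n-1, has l ≥ 1 and stop id route[s][0] = route[n-1][0]
def pvInv (route : List (Int × Int)) (n : Nat) (rs : List (Int × Int)) : Prop :=
  pvAns rs = pvF route n ∧
  (match n with
   | 0 => rs = []
   | m + 1 => ∃ s l, rs.getLast? = some (s, l) ∧ s + l = ((m : Int) + 1) ∧ 1 ≤ l ∧
       (PySem.List.pyGetD route s (0, 0)).1 = (route.getD m (0, 0)).1)

lemma pvAns_extend (rs : List (Int × Int)) (s l : Int) (hl : 1 ≤ l) :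
    pvAns (rs.dropLast ++ [(s, l + 1)]) = some (s + l) := by
  unfold pvAns
  rw [List.reverse_append, List.reverse_singleton, List.singleton_append, List.find?_cons_of_pos]
  · simp; ring
  · simp; omega

lemma pvAns_open (rs : List (Int × Int)) (i : Int) :
    pvAns (rs ++ [(i, 1)]) = pvAns rs := by
  unfold pvAns
  rw [List.reverse_append, List.reverse_singleton, List.singleton_append, List.find?_cons_of_neg]
  simp

lemma pv_invariant (route : List (Int × Int)) (n : Nat) (hn : n ≤ route.length) :
    pvInv route n (pvR route n) := by
  induction n with
  | zero => exact ⟨rfl, rfl⟩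
  | succ m ih =>
      obtain ⟨hans, hlast⟩ := ih (Nat.le_of_succ_le hn)
      rw [pvR_succ]
      cases m with
      | zero =>
          simp only at hlast
          rw [hlast]
          refine ⟨?_, 0, 1, ?_, by norm_num, by norm_num, ?_⟩
          · simp [split_route_alt_step, pvAns, pvF]
          · simp [split_route_alt_step]
          · show (PySem.List.pyGetD route ((0 : Nat) : Int) (0, 0)).1 = (route.getD 0 (0, 0)).1
            rw [PySem.List.pyGetD_natCast]
      | succ m' =>
          obtain ⟨s, l, hget, hsum, hl, hstop⟩ := hlast
          rw [split_route_alt_step, hget]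
          simp only
          have h0 : ((m' + 1 : Nat) : Int) ≠ 0 := by push_cast; omega
          have h1 : ((m' + 1 : Nat) : Int) - 1 = ((m' : Nat) : Int) := by push_cast; ring
          by_cases heq : (PySem.List.pyGetD route s (0, 0)).1 = (route.getD (m' + 1) (0, 0)).1
          · rw [if_pos heq]
            refine ⟨?_, s, l + 1, by simp, by push_cast at hsum ⊢; omega, by omega, heq⟩
            rw [pvAns_extend _ _ _ hl, pvF_succ, if_neg h0, h1, PySem.List.pyGetD_natCast,
              ← hstop, if_pos heq,
              show ((m' + 1 : Nat) : Int) = s + l by push_cast at hsum ⊢; omega]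
          · rw [if_neg heq]
            refine ⟨?_, ((m' + 1 : Nat) : Int), 1, by simp, by push_cast; ring, le_refl 1,
              by rw [PySem.List.pyGetD_natCast]⟩
            rw [pvAns_open, pvF_succ, if_neg h0, h1, PySem.List.pyGetD_natCast, ← hstop,
              if_neg heq]
            exact hans

lemma pvA_eq (route : List (Int × Int)) :
    split_route route
      = match pvF route route.length with
        | none => [route]
        | some k => [PySem.List.slice route none (some k), PySem.List.slice route (some k) none] := by
  unfold split_route
  rw [enum_eq_map_range]
  simp only [List.foldl_map, zero_add]
  rfl

lemma pvB_eq (route : List (Int × Int)) :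
    split_route_alt route
      = match (pvR route route.length).reverse.find? (fun sl => 2 ≤ sl.2) with
        | none => [route]
        | some sl => [PySem.List.slice route none (some (sl.1 + sl.2 - 1)),
                      PySem.List.slice route (some (sl.1 + sl.2 - 1)) none] := by
  unfold split_route_alt
  rw [enum_eq_map_range]
  simp only [List.foldl_map, zero_add]
  rfl

theorem split_route_spec_aux (route : List (Int × Int)) :
    split_route route = split_route_alt route := by
  have hans := (pv_invariant route route.length (le_refl _)).1
  rw [pvA_eq, pvB_eq, ← hans]
  unfold pvAns
  cases h : (pvR route route.length).reverse.find? (fun sl => 2 ≤ sl.2) with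
  | none => simp
  | some sl => simp

-- ===== VERDICT (by name: the statement is the Claim_ definition above) =====
theorem split_route_spec : Claim_equal_split_route := by
  intro route _
  exact split_route_spec_aux route
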